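-- pv_equiv track=rewrite | github.com/aimldlnlp/skripsi-unair-vln | data_skripsi/navgen/eval/cs_metrics_objective.py | compute_spans
-- ===== SOURCE A (Python) =====
-- from typing import List, Dict, Tuple
--
-- def filter_id_en(seq: List[str]) -> List[str]:
--     """Ambil hanya label 'id' dan 'en' (abaikan 'unk')."""
--     return [tag for tag in seq if tag in ("id", "en")]
--
-- def compute_spans(lang_seq: List[str]) -> List[Tuple[str, int]]:
--     """
--     Hitung language span hanya untuk id/en.
--       input: ['id','unk','en','en','id']
--       filter -> ['id','en','en','id']
--       output spans: [('id',1), ('en',2), ('id',1)]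
--     """
--     seq = filter_id_en(lang_seq)
--     spans = []
--     if not seq:
--         return spans
--
--     cur_lang = seq[0]
--     cur_len = 1
--     for tag in seq[1:]:
--         if tag == cur_lang:
--             cur_len += 1
--         else:
--             spans.append((cur_lang, cur_len))
--             cur_lang = tag
--             cur_len = 1
--     spans.append((cur_lang, cur_len))
--     return spans
-- ===== SOURCE B (Python) =====
-- def compute_spans(lang_seq):
--     # two-pointer span scan over the filtered sequence (no running cur_lang/cur_len state machine)
--     seq = [t for t in lang_seq if t in ("id", "en")]
--     spans = []
--     i = 0
--     n = len(seq)
--     while i < n: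
--         j = i + 1
--         while j < n and seq[j] == seq[i]:
--             j += 1
--         spans.append((seq[i], j - i))
--         i = j
--     return spans
-- ===== Notes on version B (the rewrite author's own statement) =====
-- stated objective: alternative
-- what changed: Replaces A's single-pass cur_lang/cur_len accumulator state machine with a two-pointer scan that, for each run start, advances a second index to the run's end and emits (tag, j-i) directly, with no running span list threaded through a fold.
import Mathlib
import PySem

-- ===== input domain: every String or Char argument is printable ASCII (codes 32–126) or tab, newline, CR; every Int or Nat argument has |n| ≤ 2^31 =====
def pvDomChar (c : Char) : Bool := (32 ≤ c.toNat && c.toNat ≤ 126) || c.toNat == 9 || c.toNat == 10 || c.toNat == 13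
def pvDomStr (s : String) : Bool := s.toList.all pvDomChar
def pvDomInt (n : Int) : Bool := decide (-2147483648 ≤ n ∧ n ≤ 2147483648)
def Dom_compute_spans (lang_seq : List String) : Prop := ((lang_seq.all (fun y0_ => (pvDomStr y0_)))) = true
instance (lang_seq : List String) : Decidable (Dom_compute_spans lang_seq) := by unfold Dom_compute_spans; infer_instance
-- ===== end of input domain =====

-- B replaces A's cur_lang/cur_len accumulator state machine by a two-pointer run scan; objective: alternative decomposition (same cost).

-- ===== PORT A =====
def filter_id_en (seq : List String) : List String :=
  seq.filter (fun tag => tag == "id" || tag == "en")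

def compute_spans (lang_seq : List String) : List (String × Int) :=
  let seq := filter_id_en lang_seq
  match seq with
  | [] => []
  | h :: t =>
    let st := t.foldl
      (fun (s : List (String × Int) × String × Int) tag =>
        if tag == s.2.1 then (s.1, s.2.1, s.2.2 + 1)
        else (s.1 ++ [(s.2.1, s.2.2)], tag, 1))
      ([], h, 1)
    st.1 ++ [(st.2.1, st.2.2)]

-- ===== PORT B =====
-- the inner 'while j < n and seq[j] == seq[i]' scan is the takeWhile/dropWhile split at the run start
def spanScan : List String → List (String × Int)
  | [] => []
  | x :: xs =>
    (x, (1 + (xs.takeWhile (· == x)).length : Int)) :: spanScan (xs.dropWhile (· == x))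
termination_by l => l.length
decreasing_by
  exact Nat.lt_succ_of_le (List.length_dropWhile_le _ _)

def compute_spans_alt (lang_seq : List String) : List (String × Int) :=
  spanScan (lang_seq.filter (fun t => t == "id" || t == "en"))

-- ===== PRECONDITION & SPEC =====
def Spec_compute_spans (lang_seq : List String) (out : List (String × Int)) : Prop := out = compute_spans_alt lang_seq
instance (lang_seq : List String) (out : List (String × Int)) : Decidable (Spec_compute_spans lang_seq out) := by unfold Spec_compute_spans; infer_instance

-- ===== CLAIM (what is proved, stated in full; the proofs are below) =====
def Claim_equal_compute_spans : Prop := ∀ (lang_seq : List String), Dom_compute_spans lang_seq → Spec_compute_spans lang_seq (compute_spans lang_seq)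

-- ===== LEMMAS AND PROOFS =====

-- A's fold, flushed with its final (cur_lang, cur_len), equals spans ++ the runs of the rest
-- where the open run (cur, len) absorbs the leading tags equal to cur.
theorem foldA_eq_spanScan (t : List String) (spans : List (String × Int)) (cur : String) (len : Int) :
    ((t.foldl
        (fun (s : List (String × Int) × String × Int) tag =>
          if tag == s.2.1 then (s.1, s.2.1, s.2.2 + 1)
          else (s.1 ++ [(s.2.1, s.2.2)], tag, 1))
        (spans, cur, len))).1 ++
      [(((t.foldl
        (fun (s : List (String × Int) × String × Int) tag =>
          if tag == s.2.1 then (s.1, s.2.1, s.2.2 + 1)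
          else (s.1 ++ [(s.2.1, s.2.2)], tag, 1))
        (spans, cur, len))).2.1,
        ((t.foldl
        (fun (s : List (String × Int) × String × Int) tag =>
          if tag == s.2.1 then (s.1, s.2.1, s.2.2 + 1)
          else (s.1 ++ [(s.2.1, s.2.2)], tag, 1))
        (spans, cur, len))).2.2)]
    = spans ++ (cur, len + (t.takeWhile (· == cur)).length) :: spanScan (t.dropWhile (· == cur)) := by
  induction t generalizing spans cur len with
  | nil => simp [spanScan]
  | cons a t ih =>
    by_cases h : a = cur
    · subst h
      simp only [List.foldl_cons, if_pos (beq_self_eq_true a)]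
      rw [ih]
      simp only [List.takeWhile_cons, List.dropWhile_cons, beq_self_eq_true, if_pos,
        List.length_cons]
      push_cast
      ring_nf
    · have hb : (a == cur) = false := beq_eq_false_iff_ne.mpr h
      simp only [List.foldl_cons, hb, Bool.false_eq_true, if_false]
      rw [ih]
      simp [hb, spanScan]

-- ===== VERDICT (by name: the statement is the Claim_ definition above) =====
theorem compute_spans_spec : Claim_equal_compute_spans := by
  intro lang_seq _
  unfold Spec_compute_spans compute_spans compute_spans_alt filter_id_en
  cases hseq : lang_seq.filter (fun tag => tag == "id" || tag == "en") with
  | nil => simp [spanScan]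
  | cons h t =>
    simp only []
    rw [foldA_eq_spanScan t [] h 1]
    simp [spanScan]
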